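-- pv_equiv track=rewrite | github.com/oleg-alexandrov/olegmisc | bin/update_cpp.py | splitByTopComments
-- ===== SOURCE A (Python) =====
-- def splitByTopComments(text):
--     """
--     Return the top-most lines having comments, then the rest of the text.
--     """
--
--     comments = ""
--     other = ""
--
--     # There can be multiple lines, so split by newline
--     lines = text.split('\n')
--
--     startedNonComments = False
--
--     for line in lines:
--         if not line.startswith('//'):
--             startedNonComments = True
--
--         if startedNonComments:
--             other = other + line + '\n'
--         else:
--             comments = comments + line + '\n'
--
--     return (comments, other)
-- ===== SOURCE B (Python) =====
-- def splitByTopComments(text):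
--     """
--     Return the top-most lines having comments, then the rest of the text.
--     """
--     lines = text.split('\n')
--     # index of the first line that is not a '//' comment (len(lines) if all are)
--     i = next((k for k, line in enumerate(lines) if not line.startswith('//')), len(lines))
--     comments = ''.join(line + '\n' for line in lines[:i])
--     other = ''.join(line + '\n' for line in lines[i:])
--     return (comments, other)
-- ===== Notes on version B (the rewrite author's own statement) =====
-- stated objective: simpler
-- what changed: Replaces the stateful flag-and-dispatch loop over lines with a boundary search (index of the first non-'//' line) followed by two slice-and-join passes.
import Mathlib
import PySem

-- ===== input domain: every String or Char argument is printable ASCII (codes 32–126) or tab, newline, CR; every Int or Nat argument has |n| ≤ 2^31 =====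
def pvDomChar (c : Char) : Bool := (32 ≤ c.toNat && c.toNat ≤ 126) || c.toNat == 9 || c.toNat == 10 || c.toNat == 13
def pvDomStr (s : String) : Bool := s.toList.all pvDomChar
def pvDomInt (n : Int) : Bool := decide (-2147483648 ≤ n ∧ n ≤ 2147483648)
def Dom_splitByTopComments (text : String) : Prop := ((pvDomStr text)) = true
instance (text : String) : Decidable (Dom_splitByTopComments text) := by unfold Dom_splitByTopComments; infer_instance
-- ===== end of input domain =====

-- B replaces A's stateful flag-and-dispatch loop by a boundary search plus two slice-and-join passes (objective: simpler).

-- text.split('\n'), on code points (PySem.Str.* are thin wrappers over PySem.Chars.* on .toList)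
def pvLines (text : String) : List (List Char) := PySem.Chars.splitOn text.toList ['\n']

-- ===== PORT A =====
-- the for-loop of A over the remaining lines, with state (startedNonComments, comments, other);
-- Python's string concatenation 'x + line + "\n"' is List Char append, exact on this domain
def splitA_go : List (List Char) → Bool → List Char → List Char → List Char × List Char
  | [], _, comments, other => (comments, other)
  | line :: rest, started, comments, other =>
      let started' := if PySem.Chars.startswith line ['/', '/'] then started else true
      if started' then splitA_go rest started' comments (other ++ line ++ ['\n'])
      else splitA_go rest started' (comments ++ line ++ ['\n']) other

def splitByTopComments (text : String) : String × String :=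
  let r := splitA_go (pvLines text) false [] []
  (String.ofList r.1, String.ofList r.2)

-- ===== PORT B =====
def splitByTopComments_alt (text : String) : String × String :=
  let lines := pvLines text
  -- index of the first line not starting with '//' (lines.length if all do)
  let i := (lines.takeWhile (fun l => PySem.Chars.startswith l ['/', '/'])).length
  (String.ofList (PySem.Chars.join [] ((lines.take i).map (fun l => l ++ ['\n']))),
   String.ofList (PySem.Chars.join [] ((lines.drop i).map (fun l => l ++ ['\n']))))

-- ===== PRECONDITION & SPEC =====
def Spec_splitByTopComments (text : String) (out : String × String) : Prop := out = splitByTopComments_alt text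
instance (text : String) (out : String × String) : Decidable (Spec_splitByTopComments text out) := by unfold Spec_splitByTopComments; infer_instance

-- ===== CLAIM (what is proved, stated in full; the proofs are below) =====
def Claim_equal_splitByTopComments : Prop := ∀ (text : String), Dom_splitByTopComments text → Spec_splitByTopComments text (splitByTopComments text)

-- ===== LEMMAS AND PROOFS =====

-- A's accumulation of 'line + "\n"' pieces onto an accumulator
def pvCatAll (s : List Char) (ls : List (List Char)) : List Char :=
  ls.foldl (fun acc l => acc ++ l ++ ['\n']) s

theorem pvCatAll_nil (s : List Char) : pvCatAll s [] = s := rfl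

theorem pvCatAll_cons (s l : List Char) (ls : List (List Char)) :
    pvCatAll s (l :: ls) = pvCatAll (s ++ l ++ ['\n']) ls := rfl

-- once the flag is set, every remaining line goes to 'other'
theorem splitA_go_true (ls : List (List Char)) : ∀ (c o : List Char),
    splitA_go ls true c o = (c, pvCatAll o ls) := by
  induction ls with
  | nil => intro c o; simp [splitA_go, pvCatAll_nil]
  | cons l rest ih =>
      intro c o
      simp only [splitA_go, ite_self, if_true]
      rw [ih, pvCatAll_cons]

-- with the flag unset, A splits at the first non-'//' line
theorem splitA_go_false (ls : List (List Char)) : ∀ (c o : List Char),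
    splitA_go ls false c o =
      (pvCatAll c (ls.takeWhile (fun l => PySem.Chars.startswith l ['/', '/'])),
       pvCatAll o (ls.dropWhile (fun l => PySem.Chars.startswith l ['/', '/']))) := by
  induction ls with
  | nil => intro c o; simp [splitA_go, pvCatAll_nil]
  | cons l rest ih =>
      intro c o
      by_cases h : PySem.Chars.startswith l ['/', '/'] = true
      · simp only [splitA_go, Bool.false_eq_true, if_false, List.takeWhile_cons,
          List.dropWhile_cons, h, if_true]
        rw [ih, pvCatAll_cons]
      · simp only [splitA_go, if_true, List.takeWhile_cons,
          List.dropWhile_cons, h, Bool.false_eq_true, if_false]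
        rw [splitA_go_true, pvCatAll_nil, pvCatAll_cons]

-- intercalating the empty separator is flattening
theorem join_nil_eq_flatten (parts : List (List Char)) :
    PySem.Chars.join [] parts = parts.flatten := by
  induction parts with
  | nil => rfl
  | cons p rest ih =>
      cases rest with
      | nil => simp [PySem.Chars.join, List.intercalate]
      | cons q rest' =>
          rw [PySem.Chars.join_cons_cons, ih]
          simp

-- the accumulator factors out of A's concatenation loop
theorem pvCatAll_eq_append (ls : List (List Char)) : ∀ (s : List Char),
    pvCatAll s ls = s ++ pvCatAll [] ls := by
  induction ls with
  | nil => intro s; simp [pvCatAll_nil]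
  | cons l rest ih =>
      intro s
      rw [pvCatAll_cons, pvCatAll_cons, ih, ih ([] ++ l ++ ['\n'])]
      simp

-- B's join of mapped lines is the same list as A's accumulated concatenation
theorem join_map_eq_pvCatAll (ls : List (List Char)) :
    PySem.Chars.join [] (ls.map (fun l => l ++ ['\n'])) = pvCatAll [] ls := by
  rw [join_nil_eq_flatten]
  induction ls with
  | nil => rfl
  | cons l rest ih =>
      rw [List.map_cons, List.flatten_cons, ih, pvCatAll_cons,
        pvCatAll_eq_append rest ([] ++ l ++ ['\n'])]
      simp

-- ===== VERDICT (by name: the statement is the Claim_ definition above) =====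
theorem splitByTopComments_spec : Claim_equal_splitByTopComments := by
  intro text _
  unfold Spec_splitByTopComments splitByTopComments splitByTopComments_alt
  simp only
  rw [splitA_go_false]
  set lines := pvLines text with hl
  set p : List Char → Bool := fun l => PySem.Chars.startswith l ['/', '/'] with hp
  have ht : List.take (lines.takeWhile p).length lines = lines.takeWhile p := by
    nth_rewrite 2 [← List.takeWhile_append_dropWhile (p := p) (l := lines)]
    exact List.take_left
  have hd : List.drop (lines.takeWhile p).length lines = lines.dropWhile p := by
    nth_rewrite 2 [← List.takeWhile_append_dropWhile (p := p) (l := lines)]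
    exact List.drop_left
  rw [ht, hd, join_map_eq_pvCatAll, join_map_eq_pvCatAll]
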